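-- pv_equiv track=rewrite | github.com/dudcha/misc_3D_mammoth | Plots-Curves-Coords.py | dragon_to_poslist
-- ===== SOURCE A (Python) =====
-- def dragon_to_poslist(dragon_curve):
--     x, y = 0, 0
--     poslist = [(x, y)]
--     directions = [(0, 1), (1, 0), (0, -1), (-1, 0)]
--     direction_index = 0
--     for move in dragon_curve:
--         if move == "R":  # Right turn
--             direction_index = (direction_index + 1) % 4  # Cycle through directions
--         elif move == "L":  # Left turn
--             direction_index = (direction_index - 1) % 4
--         else:
--             continue  # Skip invalid turns
--
--         dx, dy = directions[direction_index]  # Get the new direction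
--         x += dx  # Update x coordinate
--         y += dy  # Update y coordinate
--         poslist.append((x, y))
--     return poslist
-- ===== SOURCE B (Python) =====
-- def dragon_to_poslist(dragon_curve):
--     # Pass 1: keep only R/L and turn each into a rotation delta.
--     deltas = [1 if c == "R" else -1 for c in dragon_curve if c in ("R", "L")]
--     # Pass 2: running direction index (mod 4) after each turn.
--     indices = []
--     d = 0
--     for t in deltas:
--         d = (d + t) % 4
--         indices.append(d)
--     # Pass 3: map indices to unit vectors.
--     table = [(0, 1), (1, 0), (0, -1), (-1, 0)]
--     vecs = [table[i] for i in indices]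
--     # Pass 4: running sum of vectors, starting from (0, 0).
--     coords = [(0, 0)]
--     x, y = 0, 0
--     for dx, dy in vecs:
--         x += dx
--         y += dy
--         coords.append((x, y))
--     return coords
-- ===== Notes on version B (the rewrite author's own statement) =====
-- stated objective: alternative
-- what changed: Replaced A's single fused loop (mutating direction index and position together) by a four-stage pipeline: filter/map turns to +-1 deltas, prefix-scan them mod 4 into direction indices, map indices to unit vectors, then prefix-sum the vectors into coordinates.
import Mathlib
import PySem

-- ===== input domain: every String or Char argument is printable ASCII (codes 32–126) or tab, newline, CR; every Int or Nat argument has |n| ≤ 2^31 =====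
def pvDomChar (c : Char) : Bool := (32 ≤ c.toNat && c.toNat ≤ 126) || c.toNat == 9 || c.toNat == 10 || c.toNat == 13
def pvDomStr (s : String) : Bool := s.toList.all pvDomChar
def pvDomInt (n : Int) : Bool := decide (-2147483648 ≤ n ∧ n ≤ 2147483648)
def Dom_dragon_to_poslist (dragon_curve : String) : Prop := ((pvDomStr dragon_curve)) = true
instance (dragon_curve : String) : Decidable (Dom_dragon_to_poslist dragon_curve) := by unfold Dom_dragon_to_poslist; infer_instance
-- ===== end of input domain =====

-- B replaces A's single fused loop by a four-stage pipeline (filter/map to deltas, scan mod 4 to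
-- direction indices, map to unit vectors, prefix-sum to coordinates); objective: alternative decomposition.

-- ===== PORT A =====
-- A's directions table
def dirsA : List (Int × Int) := [(0, 1), (1, 0), (0, -1), (-1, 0)]

-- A's for-loop over the characters, state (x, y, direction_index, poslist)
def dragonLoopA : List Char → Int → Int → Int → List (Int × Int) → List (Int × Int)
  | [], _, _, _, pos => pos
  | c :: cs, x, y, di, pos =>
    if c = 'R' then
      let di' := PySem.Int.mod (di + 1) 4
      let v := (PySem.List.pyGet? dirsA di').getD (0, 0)
      dragonLoopA cs (x + v.1) (y + v.2) di' (pos ++ [(x + v.1, y + v.2)])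
    else if c = 'L' then
      let di' := PySem.Int.mod (di - 1) 4
      let v := (PySem.List.pyGet? dirsA di').getD (0, 0)
      dragonLoopA cs (x + v.1) (y + v.2) di' (pos ++ [(x + v.1, y + v.2)])
    else
      dragonLoopA cs x y di pos

def dragon_to_poslist (dragon_curve : String) : List (Int × Int) :=
  dragonLoopA dragon_curve.toList 0 0 0 [(0, 0)]

-- ===== PORT B =====
-- B's table of unit vectors
def tableB : List (Int × Int) := [(0, 1), (1, 0), (0, -1), (-1, 0)]

-- Pass 1: filter to R/L and map to rotation deltas
def deltasB (cs : List Char) : List Int :=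
  (cs.filter (fun c => c = 'R' ∨ c = 'L')).map (fun c => if c = 'R' then (1 : Int) else -1)

-- Pass 2: running direction index mod 4
def scanIdxB : List Int → Int → List Int
  | [], _ => []
  | t :: ts, d => let d' := PySem.Int.mod (d + t) 4; d' :: scanIdxB ts d'

-- Pass 4: running coordinate sum
def scanPosB : List (Int × Int) → Int → Int → List (Int × Int)
  | [], _, _ => []
  | v :: vs, x, y => (x + v.1, y + v.2) :: scanPosB vs (x + v.1) (y + v.2)

def dragon_to_poslist_alt (dragon_curve : String) : List (Int × Int) :=
  let deltas := deltasB dragon_curve.toList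
  let indices := scanIdxB deltas 0
  let vecs := indices.map (fun i => (PySem.List.pyGet? tableB i).getD (0, 0))
  (0, 0) :: scanPosB vecs 0 0

-- ===== PRECONDITION & SPEC =====
def Spec_dragon_to_poslist (dragon_curve : String) (out : List (Int × Int)) : Prop := out = dragon_to_poslist_alt dragon_curve
instance (dragon_curve : String) (out : List (Int × Int)) : Decidable (Spec_dragon_to_poslist dragon_curve out) := by unfold Spec_dragon_to_poslist; infer_instance

-- ===== CLAIM (what is proved, stated in full; the proofs are below) =====
def Claim_equal_dragon_to_poslist : Prop := ∀ (dragon_curve : String), Dom_dragon_to_poslist dragon_curve → Spec_dragon_to_poslist dragon_curve (dragon_to_poslist dragon_curve)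

-- ===== LEMMAS AND PROOFS =====
theorem dragonLoopA_eq (cs : List Char) :
    ∀ (x y di : Int) (pos : List (Int × Int)),
      dragonLoopA cs x y di pos =
        pos ++ scanPosB ((scanIdxB (deltasB cs) di).map
          (fun i => (PySem.List.pyGet? tableB i).getD (0, 0))) x y := by
  induction cs with
  | nil => intro x y di pos; simp [dragonLoopA, deltasB, scanIdxB, scanPosB]
  | cons c cs ih =>
    intro x y di pos
    by_cases hR : c = 'R'
    · subst hR
      simp [dragonLoopA, deltasB, scanIdxB, scanPosB, ih, dirsA, tableB]
    · by_cases hL : c = 'L'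
      · subst hL
        simp [dragonLoopA, hR, deltasB, scanIdxB, scanPosB, ih, dirsA, tableB, sub_eq_add_neg]
      · simp [dragonLoopA, hR, hL, deltasB, ih]

-- ===== VERDICT (by name: the statement is the Claim_ definition above) =====
theorem dragon_to_poslist_spec : Claim_equal_dragon_to_poslist := by
  intro s _
  unfold Spec_dragon_to_poslist dragon_to_poslist dragon_to_poslist_alt
  simp [dragonLoopA_eq]
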